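-- pv_equiv track=rewrite | github.com/codeAntu/LeetCode-problems | Test/a1.py | max_sum_of_beauties
-- ===== SOURCE A (Python) =====
-- def get_beauty(grid, start_row, start_col, size):
--     subgrid = [grid[i][start_col:start_col+size] for i in range(start_row, start_row+size)]
--     flat_subgrid = [item for row in subgrid for item in row]
--     return max(flat_subgrid) - min(flat_subgrid)
--
-- def max_sum_of_beauties(grid):
--     N = len(grid)
--     max_sum = 0
--
--     # We iterate over all possible sub-grids
--     for size1 in range(1, N+1):
--         for row1 in range(N - size1 + 1):
--             for col1 in range(N - size1 + 1):
--                 beauty1 = get_beauty(grid, row1, col1, size1)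
--
--                 # Find a non-overlapping sub-grid
--                 for size2 in range(1, N+1):
--                     for row2 in range(N - size2 + 1):
--                         for col2 in range(N - size2 + 1):
--                             # Check if the two sub-grids overlap
--                             if not (row2 < row1 + size1 and row2 + size2 > row1 and col2 < col1 + size1 and col2 + size2 > col1):
--                                 beauty2 = get_beauty(grid, row2, col2, size2)
--                                 max_sum = max(max_sum, beauty1 + beauty2)
--
--     return max_sum
-- ===== SOURCE B (Python) =====
-- def _beauty(grid, r, c, s):
--     # one pass over the square's cells tracking (mn, mx)
--     mn = mx = grid[r][c]
--     for i in range(r, r + s):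
--         for v in grid[i][c:c + s]:
--             if v < mn:
--                 mn = v
--             if v > mx:
--                 mx = v
--     return mx - mn
--
-- def max_sum_of_beauties(grid):
--     N = len(grid)
--     # every square subgrid, with its beauty computed once
--     squares = [(r, c, s, _beauty(grid, r, c, s))
--                for s in range(1, N + 1)
--                for r in range(N - s + 1)
--                for c in range(N - s + 1)]
--     ans = 0
--     # two disjoint squares are exactly those separated by a horizontal
--     # or vertical grid line t; combine the best square on each side
--     for t in range(1, N):
--         top = max(b for (r, c, s, b) in squares if r + s <= t)
--         bot = max(b for (r, c, s, b) in squares if r >= t)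
--         left = max(b for (r, c, s, b) in squares if c + s <= t)
--         right = max(b for (r, c, s, b) in squares if c >= t)
--         ans = max(ans, top + bot, left + right)
--     return ans
-- ===== Notes on version B (the rewrite author's own statement) =====
-- stated objective: faster
-- what changed: B computes each square subgrid's beauty once with a single min/max pass and replaces A's all-pairs non-overlap rescan by a separating-line partition: for every horizontal/vertical grid line it combines the best beauty on each side, which covers exactly the non-overlapping pairs.
import Mathlib
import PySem

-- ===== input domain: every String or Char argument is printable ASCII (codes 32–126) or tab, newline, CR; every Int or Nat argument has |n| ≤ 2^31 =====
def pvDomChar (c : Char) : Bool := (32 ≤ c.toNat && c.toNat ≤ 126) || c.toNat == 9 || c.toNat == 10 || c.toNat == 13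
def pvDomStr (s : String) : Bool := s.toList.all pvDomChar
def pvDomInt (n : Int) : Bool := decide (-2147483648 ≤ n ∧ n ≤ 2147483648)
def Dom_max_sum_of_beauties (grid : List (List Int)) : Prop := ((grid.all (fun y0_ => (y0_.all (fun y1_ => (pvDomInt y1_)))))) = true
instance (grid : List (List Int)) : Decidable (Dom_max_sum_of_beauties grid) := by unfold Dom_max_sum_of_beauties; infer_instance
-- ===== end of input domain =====

-- B computes each square's beauty once (single min/max pass) and maximises over
-- separating-line partitions instead of A's all-pairs rescan; equivalence of the
-- return values is proved on grids whose rows are at least len(grid) long.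

-- ===== PORT A =====
-- max()/min() raise ValueError on an empty sequence; Pre_ excludes exactly those
-- inputs, so the `.getD 0` fallbacks are unreachable inside Pre_.
def pvGetBeauty (grid : List (List Int)) (start_row start_col size : Nat) : Int :=
  let subgrid := (List.range size).map (fun k =>
    PySem.List.slice (grid.getD (start_row + k) [])
      (some (start_col : Int)) (some ((start_col : Int) + (size : Int))))
  let flat := subgrid.flatten
  (PySem.List.max? flat (fun x => x)).getD 0 - (PySem.List.min? flat (fun x => x)).getD 0

def max_sum_of_beauties (grid : List (List Int)) : Int :=
  let N := grid.length
  ((List.range N).map (· + 1)).foldl (fun acc s1 =>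
    (List.range (N - s1 + 1)).foldl (fun acc r1 =>
      (List.range (N - s1 + 1)).foldl (fun acc c1 =>
        let b1 := pvGetBeauty grid r1 c1 s1
        ((List.range N).map (· + 1)).foldl (fun acc s2 =>
          (List.range (N - s2 + 1)).foldl (fun acc r2 =>
            (List.range (N - s2 + 1)).foldl (fun acc c2 =>
              if ¬(r2 < r1 + s1 ∧ r1 < r2 + s2 ∧ c2 < c1 + s1 ∧ c1 < c2 + s2) then
                max acc (b1 + pvGetBeauty grid r2 c2 s2)
              else acc) acc) acc) acc) acc) acc) 0

-- ===== PORT B =====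
-- _beauty: one pass over the square's cells tracking (mn, mx)
def pvBeautyAlt (grid : List (List Int)) (r c s : Nat) : Int :=
  let x0 := (grid.getD r []).getD c 0   -- grid[r][c]; in range inside Pre_
  let st := (List.range s).foldl (fun (p : Int × Int) i =>
      (PySem.List.slice (grid.getD (r + i) [])
        (some (c : Int)) (some ((c : Int) + (s : Int)))).foldl
        (fun (q : Int × Int) v => (min q.1 v, max q.2 v)) p) (x0, x0)
  st.2 - st.1

def pvSquares (grid : List (List Int)) : List (Nat × Nat × Nat × Int) :=
  let N := grid.length
  ((List.range N).map (· + 1)).flatMap (fun s =>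
    (List.range (N - s + 1)).flatMap (fun r =>
      (List.range (N - s + 1)).map (fun c => (r, c, s, pvBeautyAlt grid r c s))))

-- max(generator); the generator is never empty for t in range(1, N) (see lemmas),
-- so the `.getD 0` fallback is unreachable inside Pre_.
def pvGenMax (l : List Int) : Int := (PySem.List.max? l (fun x => x)).getD 0

def max_sum_of_beauties_alt (grid : List (List Int)) : Int :=
  let N := grid.length
  let squares := pvSquares grid
  ((List.range (N - 1)).map (· + 1)).foldl (fun acc t =>
    let top := pvGenMax ((squares.filter (fun q => decide (q.1 + q.2.2.1 ≤ t))).map (fun q => q.2.2.2))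
    let bot := pvGenMax ((squares.filter (fun q => decide (t ≤ q.1))).map (fun q => q.2.2.2))
    let left := pvGenMax ((squares.filter (fun q => decide (q.2.1 + q.2.2.1 ≤ t))).map (fun q => q.2.2.2))
    let right := pvGenMax ((squares.filter (fun q => decide (t ≤ q.2.1))).map (fun q => q.2.2.2))
    max (max acc (top + bot)) (left + right)) 0

-- ===== PRECONDITION & SPEC =====
-- Pre_ excludes exactly the inputs on which A raises: if some row is shorter than
-- len(grid), A reaches max() of an empty slice and raises ValueError.
def Pre_max_sum_of_beauties (grid : List (List Int)) : Prop :=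
  ∀ row ∈ grid, grid.length ≤ row.length
instance (grid : List (List Int)) : Decidable (Pre_max_sum_of_beauties grid) := by
  unfold Pre_max_sum_of_beauties; infer_instance

def pvWitness_max_sum_of_beauties : List (List Int) := [[1, 2], [3, 4]]

def Spec_max_sum_of_beauties (grid : List (List Int)) (out : Int) : Prop := out = max_sum_of_beauties_alt grid
instance (grid : List (List Int)) (out : Int) : Decidable (Spec_max_sum_of_beauties grid out) := by unfold Spec_max_sum_of_beauties; infer_instance

-- ===== CLAIM (what is proved, stated in full; the proofs are below) =====
def Claim_equal_max_sum_of_beauties : Prop := ∀ (grid : List (List Int)), Dom_max_sum_of_beauties grid → Pre_max_sum_of_beauties grid → Spec_max_sum_of_beauties grid (max_sum_of_beauties grid)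

-- ===== LEMMAS AND PROOFS =====

-- generic fold-shape lemmas --------------------------------------------------

theorem pv_foldl_max_map {α : Type} (l : List α) (g : α → Int) (i : Int) :
    l.foldl (fun acc x => max acc (g x)) i = (l.map g).foldl max i := by
  induction l generalizing i with
  | nil => rfl
  | cons h t ih => simp [List.foldl, ih]

theorem pv_foldl_foldl_eq_flatMap {α β γ : Type} (l : List α) (f : α → List β)
    (step : γ → β → γ) (i : γ) :
    l.foldl (fun acc x => (f x).foldl step acc) i = (l.flatMap f).foldl step i := by
  induction l generalizing i with
  | nil => rfl
  | cons h t ih => simp [List.foldl, List.flatMap_cons, List.foldl_append, ih]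

theorem pv_foldl_max_pair {α : Type} (l : List α) (f g : α → Int) (i : Int) :
    l.foldl (fun acc x => max (max acc (f x)) (g x)) i
      = (l.flatMap (fun x => [f x, g x])).foldl max i := by
  induction l generalizing i with
  | nil => rfl
  | cons h t ih =>
    simp only [List.foldl_cons, List.flatMap_cons, List.cons_append]
    exact ih _

theorem pv_foldl_max_absorb (t : List Int) (a b : Int) (h : b ≤ t.foldl max a) :
    t.foldl max (max a b) = t.foldl max a := by
  induction t generalizing a with
  | nil => simpa using h
  | cons h' t' ih =>
    simp only [List.foldl_cons] at h ⊢
    rw [show max (max a b) h' = max (max a h') b from by ac_rfl]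
    exact ih (max a h') h

theorem pv_foldl_max_mem_init (h : Int) (t : List Int) (x : Int) (hx : x ∈ h :: t) :
    (h :: t).foldl max x = t.foldl max h := by
  simp only [List.foldl_cons]
  rcases List.mem_cons.1 hx with rfl | hx
  · simp
  · rw [max_comm x h, pv_foldl_max_absorb t h x ((PySem.List.le_foldl_max t h).2 x hx)]

theorem pv_foldl_min_absorb (t : List Int) (a b : Int) (h : t.foldl min a ≤ b) :
    t.foldl min (min a b) = t.foldl min a := by
  induction t generalizing a with
  | nil => simpa using h
  | cons h' t' ih =>
    simp only [List.foldl_cons] at h ⊢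
    rw [show min (min a b) h' = min (min a h') b from by ac_rfl]
    exact ih (min a h') h

theorem pv_foldl_min_mem_init (h : Int) (t : List Int) (x : Int) (hx : x ∈ h :: t) :
    (h :: t).foldl min x = t.foldl min h := by
  simp only [List.foldl_cons]
  rcases List.mem_cons.1 hx with rfl | hx
  · simp
  · rw [min_comm x h, pv_foldl_min_absorb t h x ((PySem.List.foldl_min_le t h).2 x hx)]

-- normal forms of the two ports ----------------------------------------------

def pvPairs (grid : List (List Int)) : List Int :=
  let N := grid.length
  ((List.range N).map (· + 1)).flatMap (fun s1 =>
    (List.range (N - s1 + 1)).flatMap (fun r1 =>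
      (List.range (N - s1 + 1)).flatMap (fun c1 =>
        ((List.range N).map (· + 1)).flatMap (fun s2 =>
          (List.range (N - s2 + 1)).flatMap (fun r2 =>
            ((List.range (N - s2 + 1)).filter
                (fun c2 => decide ¬(r2 < r1 + s1 ∧ r1 < r2 + s2 ∧ c2 < c1 + s1 ∧ c1 < c2 + s2))).map
              (fun c2 => pvGetBeauty grid r1 c1 s1 + pvGetBeauty grid r2 c2 s2))))))

theorem pv_A_norm (grid : List (List Int)) :
    max_sum_of_beauties grid = (pvPairs grid).foldl max 0 := by
  unfold max_sum_of_beauties pvPairs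
  simp only [PySem.List.foldl_ite_eq_foldl_filter, pv_foldl_max_map,
    pv_foldl_foldl_eq_flatMap]

def pvTop (grid : List (List Int)) (t : Nat) : Int :=
  pvGenMax (((pvSquares grid).filter (fun q => decide (q.1 + q.2.2.1 ≤ t))).map (fun q => q.2.2.2))
def pvBot (grid : List (List Int)) (t : Nat) : Int :=
  pvGenMax (((pvSquares grid).filter (fun q => decide (t ≤ q.1))).map (fun q => q.2.2.2))
def pvLeft (grid : List (List Int)) (t : Nat) : Int :=
  pvGenMax (((pvSquares grid).filter (fun q => decide (q.2.1 + q.2.2.1 ≤ t))).map (fun q => q.2.2.2))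
def pvRight (grid : List (List Int)) (t : Nat) : Int :=
  pvGenMax (((pvSquares grid).filter (fun q => decide (t ≤ q.2.1))).map (fun q => q.2.2.2))

def pvLines (grid : List (List Int)) : List Int :=
  ((List.range (grid.length - 1)).map (· + 1)).flatMap
    (fun t => [pvTop grid t + pvBot grid t, pvLeft grid t + pvRight grid t])

theorem pv_B_norm (grid : List (List Int)) :
    max_sum_of_beauties_alt grid = (pvLines grid).foldl max 0 := by
  unfold max_sum_of_beauties_alt pvLines pvTop pvBot pvLeft pvRight
  simp only [pv_foldl_max_pair]

-- extrema over a list --------------------------------------------------------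

theorem pv_le_pvGenMax (l : List Int) (x : Int) (hx : x ∈ l) : x ≤ pvGenMax l := by
  cases l with
  | nil => cases hx
  | cons h t =>
    unfold pvGenMax
    rw [PySem.List.max?_id_cons]
    rcases List.mem_cons.1 hx with rfl | hx
    · exact (PySem.List.le_foldl_max t x).1
    · exact (PySem.List.le_foldl_max t h).2 x hx

theorem pv_pvGenMax_mem (l : List Int) (hne : l ≠ []) : pvGenMax l ∈ l := by
  cases l with
  | nil => exact absurd rfl hne
  | cons h t =>
    unfold pvGenMax
    rw [PySem.List.max?_id_cons]
    rcases PySem.List.foldl_max_mem t h with heq | hmem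
    · simp [heq]
    · simp [List.mem_cons, Or.inr hmem]

-- the two beauty computations agree ------------------------------------------

theorem pv_beauty_eq (grid : List (List Int)) (r c s : Nat)
    (hPre : Pre_max_sum_of_beauties grid) (hs : 1 ≤ s)
    (hr : r + s ≤ grid.length) (hc : c + s ≤ grid.length) :
    pvBeautyAlt grid r c s = pvGetBeauty grid r c s := by
  have hrow : ∀ k, k < s → grid.length ≤ (grid.getD (r + k) []).length := by
    intro k hk
    have hlt : r + k < grid.length := by omega
    have hm : grid.getD (r + k) [] ∈ grid := by
      rw [List.getD_eq_getElem _ _ hlt]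
      exact List.getElem_mem hlt
    exact hPre _ hm
  have hcl : c < (grid.getD r []).length := by
    have h0 := hrow 0 (by omega)
    rw [Nat.add_zero] at h0
    omega
  obtain ⟨s', rfl⟩ : ∃ s', s = s' + 1 := ⟨s - 1, by omega⟩
  unfold pvBeautyAlt pvGetBeauty
  simp only [PySem.List.slice_natCast_add]
  rw [pv_foldl_foldl_eq_flatMap]
  rw [PySem.List.foldl_prod_mk (f := fun a e => min a e) (g := fun a e => max a e)]
  rw [← List.flatMap_def]
  have hdrop : (grid.getD r []).drop c = (grid.getD r [])[c] :: (grid.getD r []).drop (c + 1) :=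
    List.drop_eq_getElem_cons hcl
  have hx0 : (grid.getD r []).getD c 0 = (grid.getD r [])[c] := List.getD_eq_getElem _ _ hcl
  have hflat : (List.range (s' + 1)).flatMap
        (fun i => ((grid.getD (r + i) []).drop c).take (s' + 1))
      = (grid.getD r [])[c] :: (((grid.getD r []).drop (c + 1)).take s'
          ++ (List.range s').flatMap
              (fun i => ((grid.getD (r + (i + 1)) []).drop c).take (s' + 1))) := by
    rw [List.range_succ_eq_map, List.flatMap_cons, List.flatMap_map]
    simp only [Nat.succ_eq_add_one, Nat.add_zero, hdrop,
      List.take_succ_cons, List.cons_append]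
  rw [hflat, hx0]
  rw [pv_foldl_max_mem_init _ _ _ (List.mem_cons_self),
    pv_foldl_min_mem_init _ _ _ (List.mem_cons_self),
    PySem.List.max?_id_cons, PySem.List.min?_id_cons]
  simp

-- membership in the candidate lists ------------------------------------------

theorem pv_mem_squares_iff (grid : List (List Int)) (q : Nat × Nat × Nat × Int) :
    q ∈ pvSquares grid ↔ ∃ s r c, 1 ≤ s ∧ s ≤ grid.length ∧ r + s ≤ grid.length ∧
      c + s ≤ grid.length ∧ q = (r, c, s, pvBeautyAlt grid r c s) := by
  simp only [pvSquares, List.mem_flatMap, List.mem_map, List.mem_range]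
  constructor
  · rintro ⟨s, ⟨⟨s', hs', rfl⟩, r, hr, c, hc, rfl⟩⟩
    exact ⟨s' + 1, r, c, by omega, by omega, by omega, by omega, rfl⟩
  · rintro ⟨s, r, c, h1, h2, h3, h4, rfl⟩
    exact ⟨s, ⟨⟨s - 1, by omega, by omega⟩, r, by omega, c, by omega, rfl⟩⟩

theorem pv_mem_pvPairs (grid : List (List Int)) (s1 r1 c1 s2 r2 c2 : Nat)
    (h1 : 1 ≤ s1) (h2 : s1 ≤ grid.length) (h3 : r1 + s1 ≤ grid.length) (h4 : c1 + s1 ≤ grid.length)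
    (h5 : 1 ≤ s2) (h6 : s2 ≤ grid.length) (h7 : r2 + s2 ≤ grid.length) (h8 : c2 + s2 ≤ grid.length)
    (hno : ¬(r2 < r1 + s1 ∧ r1 < r2 + s2 ∧ c2 < c1 + s1 ∧ c1 < c2 + s2)) :
    pvGetBeauty grid r1 c1 s1 + pvGetBeauty grid r2 c2 s2 ∈ pvPairs grid := by
  simp only [pvPairs, List.mem_flatMap, List.mem_map, List.mem_filter, List.mem_range]
  refine ⟨s1, ⟨s1 - 1, by omega, by omega⟩,
    r1, by omega, c1, by omega,
    s2, ⟨s2 - 1, by omega, by omega⟩,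
    r2, by omega, c2, ⟨⟨by omega, by simp only [decide_eq_true_eq]; omega⟩, rfl⟩⟩

-- main inequalities ----------------------------------------------------------

theorem pv_mem_pvPairs_elim (grid : List (List Int)) (x : Int) (hx : x ∈ pvPairs grid) :
    ∃ s1 r1 c1 s2 r2 c2, 1 ≤ s1 ∧ s1 ≤ grid.length ∧ r1 + s1 ≤ grid.length ∧
      c1 + s1 ≤ grid.length ∧ 1 ≤ s2 ∧ s2 ≤ grid.length ∧ r2 + s2 ≤ grid.length ∧
      c2 + s2 ≤ grid.length ∧ ¬(r2 < r1 + s1 ∧ r1 < r2 + s2 ∧ c2 < c1 + s1 ∧ c1 < c2 + s2) ∧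
      x = pvGetBeauty grid r1 c1 s1 + pvGetBeauty grid r2 c2 s2 := by
  simp only [pvPairs, List.mem_flatMap, List.mem_map, List.mem_filter, List.mem_range] at hx
  obtain ⟨s1, ⟨⟨a, ha, rfl⟩, r1, hr1, c1, hc1, s2, ⟨⟨b, hb, rfl⟩, r2, hr2, c2, ⟨⟨hc2, hdec⟩, rfl⟩⟩⟩⟩ := hx
  exact ⟨a + 1, r1, c1, b + 1, r2, c2, by omega, by omega, by omega, by omega, by omega,
    by omega, by omega, by omega, of_decide_eq_true hdec, rfl⟩

theorem pv_le_pvTop (grid : List (List Int)) (t r c s : Nat)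
    (hq : (r, c, s, pvBeautyAlt grid r c s) ∈ pvSquares grid) (ht : r + s ≤ t) :
    pvBeautyAlt grid r c s ≤ pvTop grid t := by
  apply pv_le_pvGenMax
  exact List.mem_map.2 ⟨(r, c, s, pvBeautyAlt grid r c s),
    List.mem_filter.2 ⟨hq, decide_eq_true ht⟩, rfl⟩

theorem pv_le_pvBot (grid : List (List Int)) (t r c s : Nat)
    (hq : (r, c, s, pvBeautyAlt grid r c s) ∈ pvSquares grid) (ht : t ≤ r) :
    pvBeautyAlt grid r c s ≤ pvBot grid t := by
  apply pv_le_pvGenMax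
  exact List.mem_map.2 ⟨(r, c, s, pvBeautyAlt grid r c s),
    List.mem_filter.2 ⟨hq, decide_eq_true ht⟩, rfl⟩

theorem pv_le_pvLeft (grid : List (List Int)) (t r c s : Nat)
    (hq : (r, c, s, pvBeautyAlt grid r c s) ∈ pvSquares grid) (ht : c + s ≤ t) :
    pvBeautyAlt grid r c s ≤ pvLeft grid t := by
  apply pv_le_pvGenMax
  exact List.mem_map.2 ⟨(r, c, s, pvBeautyAlt grid r c s),
    List.mem_filter.2 ⟨hq, decide_eq_true ht⟩, rfl⟩

theorem pv_le_pvRight (grid : List (List Int)) (t r c s : Nat)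
    (hq : (r, c, s, pvBeautyAlt grid r c s) ∈ pvSquares grid) (ht : t ≤ c) :
    pvBeautyAlt grid r c s ≤ pvRight grid t := by
  apply pv_le_pvGenMax
  exact List.mem_map.2 ⟨(r, c, s, pvBeautyAlt grid r c s),
    List.mem_filter.2 ⟨hq, decide_eq_true ht⟩, rfl⟩

theorem pv_line_mem (grid : List (List Int)) (t : Nat) (h1 : 1 ≤ t) (h2 : t + 1 ≤ grid.length) :
    pvTop grid t + pvBot grid t ∈ pvLines grid ∧ pvLeft grid t + pvRight grid t ∈ pvLines grid := by
  constructor <;>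
  · simp only [pvLines, List.mem_flatMap, List.mem_map, List.mem_range]
    exact ⟨t, ⟨t - 1, by omega, by omega⟩, by simp⟩

theorem pv_A_le_B (grid : List (List Int)) (hPre : Pre_max_sum_of_beauties grid) :
    (pvPairs grid).foldl max 0 ≤ (pvLines grid).foldl max 0 := by
  rcases PySem.List.foldl_max_mem (pvPairs grid) 0 with h0 | hmem
  · rw [h0]; exact (PySem.List.le_foldl_max _ 0).1
  · obtain ⟨s1, r1, c1, s2, r2, c2, h1, h2, h3, h4, h5, h6, h7, h8, hno, hval⟩ :=
      pv_mem_pvPairs_elim grid _ hmem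
    rw [hval, ← pv_beauty_eq grid r1 c1 s1 hPre h1 h3 h4,
      ← pv_beauty_eq grid r2 c2 s2 hPre h5 h7 h8]
    have hsq1 : (r1, c1, s1, pvBeautyAlt grid r1 c1 s1) ∈ pvSquares grid :=
      (pv_mem_squares_iff grid _).2 ⟨s1, r1, c1, h1, h2, h3, h4, rfl⟩
    have hsq2 : (r2, c2, s2, pvBeautyAlt grid r2 c2 s2) ∈ pvSquares grid :=
      (pv_mem_squares_iff grid _).2 ⟨s2, r2, c2, h5, h6, h7, h8, rfl⟩
    have hcases : r1 + s1 ≤ r2 ∨ r2 + s2 ≤ r1 ∨ c1 + s1 ≤ c2 ∨ c2 + s2 ≤ c1 := by omega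
    rcases hcases with ht | ht | ht | ht
    · refine le_trans (add_le_add (pv_le_pvTop grid (r1 + s1) r1 c1 s1 hsq1 le_rfl)
        (pv_le_pvBot grid (r1 + s1) r2 c2 s2 hsq2 ht)) ?_
      exact (PySem.List.le_foldl_max _ 0).2 _ ((pv_line_mem grid (r1 + s1) (by omega) (by omega)).1)
    · rw [add_comm]
      refine le_trans (add_le_add (pv_le_pvTop grid (r2 + s2) r2 c2 s2 hsq2 le_rfl)
        (pv_le_pvBot grid (r2 + s2) r1 c1 s1 hsq1 ht)) ?_
      exact (PySem.List.le_foldl_max _ 0).2 _ ((pv_line_mem grid (r2 + s2) (by omega) (by omega)).1)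
    · refine le_trans (add_le_add (pv_le_pvLeft grid (c1 + s1) r1 c1 s1 hsq1 le_rfl)
        (pv_le_pvRight grid (c1 + s1) r2 c2 s2 hsq2 ht)) ?_
      exact (PySem.List.le_foldl_max _ 0).2 _ ((pv_line_mem grid (c1 + s1) (by omega) (by omega)).2)
    · rw [add_comm]
      refine le_trans (add_le_add (pv_le_pvLeft grid (c2 + s2) r2 c2 s2 hsq2 le_rfl)
        (pv_le_pvRight grid (c2 + s2) r1 c1 s1 hsq1 ht)) ?_
      exact (PySem.List.le_foldl_max _ 0).2 _ ((pv_line_mem grid (c2 + s2) (by omega) (by omega)).2)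

theorem pv_filter_max_spec (grid : List (List Int)) (p : Nat × Nat × Nat × Int → Bool)
    (q0 : Nat × Nat × Nat × Int) (hq0 : q0 ∈ pvSquares grid) (hp0 : p q0 = true) :
    ∃ q ∈ (pvSquares grid).filter p,
      pvGenMax (((pvSquares grid).filter p).map (fun q => q.2.2.2)) = q.2.2.2 := by
  have hmem : q0.2.2.2 ∈ ((pvSquares grid).filter p).map (fun q => q.2.2.2) :=
    List.mem_map.2 ⟨q0, List.mem_filter.2 ⟨hq0, hp0⟩, rfl⟩
  have := pv_pvGenMax_mem _ (List.ne_nil_of_mem hmem)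
  obtain ⟨q, hq, heq⟩ := List.mem_map.1 this
  exact ⟨q, hq, heq.symm⟩

theorem pv_unit_square_mem (grid : List (List Int)) (r c : Nat)
    (hr : r + 1 ≤ grid.length) (hc : c + 1 ≤ grid.length) :
    (r, c, 1, pvBeautyAlt grid r c 1) ∈ pvSquares grid :=
  (pv_mem_squares_iff grid _).2 ⟨1, r, c, le_rfl, by omega, hr, hc, rfl⟩

theorem pv_B_le_A (grid : List (List Int)) (hPre : Pre_max_sum_of_beauties grid) :
    (pvLines grid).foldl max 0 ≤ (pvPairs grid).foldl max 0 := by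
  have key : ∀ x ∈ pvLines grid, x ≤ (pvPairs grid).foldl max 0 := by
    intro x hx
    simp only [pvLines, List.mem_flatMap, List.mem_map, List.mem_range, List.mem_cons,
      List.not_mem_nil, or_false] at hx
    obtain ⟨t, ⟨u, hu, rfl⟩, hor⟩ := hx
    have ht1 : 1 ≤ u + 1 := by omega
    have ht2 : u + 1 + 1 ≤ grid.length := by omega
    rcases hor with rfl | rfl
    · -- horizontal line: top + bot
      obtain ⟨q1, hq1, he1⟩ := pv_filter_max_spec grid
        (fun q => decide (q.1 + q.2.2.1 ≤ u + 1)) _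
        (pv_unit_square_mem grid 0 0 (by omega) (by omega))
        (decide_eq_true (by omega : (0:Nat) + 1 ≤ u + 1))
      obtain ⟨q2, hq2, he2⟩ := pv_filter_max_spec grid
        (fun q => decide (u + 1 ≤ q.1)) _
        (pv_unit_square_mem grid (u + 1) 0 (by omega) (by omega))
        (decide_eq_true (by omega : u + 1 ≤ u + 1))
      obtain ⟨hm1, hp1⟩ := List.mem_filter.1 hq1
      obtain ⟨hm2, hp2⟩ := List.mem_filter.1 hq2
      obtain ⟨s1, r1, c1, g1, g2, g3, g4, rfl⟩ := (pv_mem_squares_iff grid _).1 hm1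
      obtain ⟨s2, r2, c2, f1, f2, f3, f4, rfl⟩ := (pv_mem_squares_iff grid _).1 hm2
      simp only [decide_eq_true_eq] at hp1 hp2
      unfold pvTop pvBot
      rw [he1, he2]
      simp only
      rw [pv_beauty_eq grid r1 c1 s1 hPre g1 g3 g4, pv_beauty_eq grid r2 c2 s2 hPre f1 f3 f4]
      exact (PySem.List.le_foldl_max _ 0).2 _
        (pv_mem_pvPairs grid s1 r1 c1 s2 r2 c2 g1 g2 g3 g4 f1 f2 f3 f4 (by omega))
    · -- vertical line: left + right
      obtain ⟨q1, hq1, he1⟩ := pv_filter_max_spec grid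
        (fun q => decide (q.2.1 + q.2.2.1 ≤ u + 1)) _
        (pv_unit_square_mem grid 0 0 (by omega) (by omega))
        (decide_eq_true (by omega : (0:Nat) + 1 ≤ u + 1))
      obtain ⟨q2, hq2, he2⟩ := pv_filter_max_spec grid
        (fun q => decide (u + 1 ≤ q.2.1)) _
        (pv_unit_square_mem grid 0 (u + 1) (by omega) (by omega))
        (decide_eq_true (by omega : u + 1 ≤ u + 1))
      obtain ⟨hm1, hp1⟩ := List.mem_filter.1 hq1
      obtain ⟨hm2, hp2⟩ := List.mem_filter.1 hq2
      obtain ⟨s1, r1, c1, g1, g2, g3, g4, rfl⟩ := (pv_mem_squares_iff grid _).1 hm1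
      obtain ⟨s2, r2, c2, f1, f2, f3, f4, rfl⟩ := (pv_mem_squares_iff grid _).1 hm2
      simp only [decide_eq_true_eq] at hp1 hp2
      unfold pvLeft pvRight
      rw [he1, he2]
      simp only
      rw [pv_beauty_eq grid r1 c1 s1 hPre g1 g3 g4, pv_beauty_eq grid r2 c2 s2 hPre f1 f3 f4]
      exact (PySem.List.le_foldl_max _ 0).2 _
        (pv_mem_pvPairs grid s1 r1 c1 s2 r2 c2 g1 g2 g3 g4 f1 f2 f3 f4 (by omega))
  rcases PySem.List.foldl_max_mem (pvLines grid) 0 with h0 | hmem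
  · rw [h0]; exact (PySem.List.le_foldl_max _ 0).1
  · exact le_of_eq_of_le rfl (key _ hmem)

-- ===== VERDICT =====
theorem max_sum_of_beauties_spec : Claim_equal_max_sum_of_beauties := by
  intro grid _ hPre
  unfold Spec_max_sum_of_beauties
  rw [pv_A_norm, pv_B_norm]
  exact le_antisymm (pv_A_le_B grid hPre) (pv_B_le_A grid hPre)
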